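-- pv_equiv track=rewrite | github.com/Zhaokun1997/UNSW_myDemo | COMP9021/COMP9021_exam_sample/sample_exam_questions_2/sample_3.py | good_subsequences
-- ===== SOURCE A (Python) =====
-- from itertools import combinations
--
-- def good_subsequences(word):
--     '''
--     >>> good_subsequences('')
--     ['']
--     >>> good_subsequences('aaa')
--     ['', 'a']
--     >>> good_subsequences('aaabbb')
--     ['', 'a', 'ab', 'b']
--     >>> good_subsequences('aaabbc')
--     ['', 'a', 'ab', 'abc', 'ac', 'b', 'bc', 'c']
--     >>> good_subsequences('aaabbaaa')
--     ['', 'a', 'ab', 'b', 'ba']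
--     >>> good_subsequences('abbbcaaabccc')
--     ['', 'a', 'ab', 'abc', 'ac', 'acb', 'b', 'ba', 'bac',\
--  'bc', 'bca', 'c', 'ca', 'cab', 'cb']
--     >>> good_subsequences('abbbcaaabcccaaa')
--     ['', 'a', 'ab', 'abc', 'ac', 'acb', 'b', 'ba', 'bac',\
--  'bc', 'bca', 'c', 'ca', 'cab', 'cb', 'cba']
--     >>> good_subsequences('abbbcaaabcccaaabbbbbccab')
--     ['', 'a', 'ab', 'abc', 'ac', 'acb', 'b', 'ba', 'bac',\
--  'bc', 'bca', 'c', 'ca', 'cab', 'cb', 'cba']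
--     '''
--     # Insert your code here
--     # abbcaaabcccaaa --> abcabca
--     if word:
--         new_word = ''
--         new_word += word[0]
--         for i in range(1, len(word)):
--             if word[i - 1] != word[i]:
--                 new_word += word[i]
--         result = ['']
--         for length in range(1, len(set(new_word)) + 1):
--             temp_result = []
--             for item in combinations(new_word, length):
--                 if len(item) == len(set(item)):
--                     temp_result.append(''.join(item))
--             for e in temp_result:
--                 result.append(e)
--         s = set(result)
--         result = [x for x in s]
--         result.sort(reverse=False)
--         return result
--     else:
--         return ['']
-- ===== SOURCE B (Python) =====
-- def good_subsequences(word):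
--     # BFS/DP over reachable distinct-character subsequences: one pass over the
--     # word, maintaining the set of all distinct-char subsequences seen so far.
--     seen = {''}
--     for c in word:
--         seen |= {s + c for s in seen if c not in s}
--     return sorted(seen)
-- ===== Notes on version B (the rewrite author's own statement) =====
-- stated objective: faster
-- what changed: Replaces the collapse-then-enumerate-all-combinations-per-length scheme (itertools.combinations over every length, filter distinct, dedup, sort) by a single left-to-right BFS/DP pass that maintains the set of reachable distinct-character subsequences, then sorts it.
import Mathlib
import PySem

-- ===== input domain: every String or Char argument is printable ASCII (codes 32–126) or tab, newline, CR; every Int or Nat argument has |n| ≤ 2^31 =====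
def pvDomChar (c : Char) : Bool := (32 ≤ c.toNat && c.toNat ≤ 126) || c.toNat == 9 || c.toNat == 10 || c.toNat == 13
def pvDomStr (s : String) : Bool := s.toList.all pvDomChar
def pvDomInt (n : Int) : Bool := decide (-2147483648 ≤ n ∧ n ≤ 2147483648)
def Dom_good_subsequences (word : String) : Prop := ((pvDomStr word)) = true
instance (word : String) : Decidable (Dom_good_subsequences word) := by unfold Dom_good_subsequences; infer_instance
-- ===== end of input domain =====

-- B replaces A's per-length enumeration of all combinations of the collapsed word by a
-- single left-to-right pass maintaining the set of distinct-character subsequences (faster).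


-- ===== PORT A =====
-- itertools.combinations(cs, k), as lists of chars, in Python's order
def pvCombsA : Nat → List Char → List (List Char)
  | 0, _ => [[]]
  | _ + 1, [] => []
  | k + 1, c :: rest => ((pvCombsA k rest).map (fun t => c :: t)) ++ pvCombsA (k + 1) rest

-- A's first loop: new_word = word[0]; append word[i] whenever word[i-1] != word[i]
def pvCollapseA (cs : List Char) : List Char :=
  match cs with
  | [] => []
  | c0 :: _ =>
    (PySem.List.pyRange 1 (cs.length : Int)).foldl
      (fun nw i =>
        if PySem.List.pyGetD cs (i - 1) ' ' ≠ PySem.List.pyGetD cs i ' ' then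
          nw ++ [PySem.List.pyGetD cs i ' ']
        else nw)
      [c0]

def good_subsequences (word : String) : List String :=
  if word ≠ "" then
    let nw := pvCollapseA word.toList
    let result : List String :=
      (PySem.List.pyRange 1 ((PySem.Set.ofList nw).length + 1 : Int)).foldl
        (fun res len =>
          res ++ ((pvCombsA len.toNat nw).filter
              (fun item => item.length == (PySem.Set.ofList item).length)).map
              (fun item => String.ofList item))
        [""]
    PySem.List.sorted (PySem.Set.ofList result) (fun x => x)
  else [""]

-- ===== PORT B =====
-- one step of B's loop: seen |= {s + c for s in seen if c not in s}
def pvStepB (seen : PySem.Set (List Char)) (c : Char) : PySem.Set (List Char) :=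
  ((seen.filter (fun s => !s.contains c)).map (fun s => s ++ [c])).foldl PySem.Set.add seen

def good_subsequences_alt (word : String) : List String :=
  let seen : PySem.Set (List Char) := word.toList.foldl pvStepB (PySem.Set.ofList [[]])
  PySem.List.sorted (seen.map (fun s => String.ofList s)) (fun x => x)

-- ===== PRECONDITION & SPEC =====
def Spec_good_subsequences (word : String) (out : List String) : Prop := out = good_subsequences_alt word
instance (word : String) (out : List String) : Decidable (Spec_good_subsequences word out) := by unfold Spec_good_subsequences; infer_instance

-- ===== CLAIM (what is proved, stated in full; the proofs are below) =====
def Claim_equal_good_subsequences : Prop := ∀ (word : String), Dom_good_subsequences word → Spec_good_subsequences word (good_subsequences word)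

-- ===== LEMMAS AND PROOFS =====

-- run-collapse, recursively (proof-side model of A's first loop)
def pvCol : List Char → List Char
  | [] => []
  | [a] => [a]
  | a :: b :: r => if a = b then pvCol (b :: r) else a :: pvCol (b :: r)

theorem pvCombsA_mem (l : List Char) : ∀ (k : Nat) (x : List Char),
    x ∈ pvCombsA k l ↔ x.length = k ∧ x.Sublist l := by
  induction l with
  | nil =>
    intro k x
    cases k with
    | zero =>
      simp [pvCombsA, List.sublist_nil, List.length_eq_zero_iff]
    | succ k =>
      simp only [pvCombsA, List.not_mem_nil, false_iff, not_and, List.sublist_nil]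
      intro h rfl; simp at h
  | cons c rest ih =>
    intro k x
    cases k with
    | zero =>
      simp only [pvCombsA, List.mem_singleton, List.length_eq_zero_iff]
      constructor
      · rintro rfl; exact ⟨rfl, List.nil_sublist _⟩
      · rintro ⟨rfl, _⟩; rfl
    | succ k =>
      simp only [pvCombsA, List.mem_append, List.mem_map, ih, List.sublist_cons_iff]
      constructor
      · rintro (⟨t, ⟨hlen, hsub⟩, rfl⟩ | ⟨hlen, hsub⟩)
        · exact ⟨by simp [hlen], Or.inr ⟨t, rfl, hsub⟩⟩
        · exact ⟨hlen, Or.inl hsub⟩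
      · rintro ⟨hlen, hsub | ⟨r, rfl, hr⟩⟩
        · exact Or.inr ⟨hlen, hsub⟩
        · exact Or.inl ⟨r, ⟨by simpa using hlen, hr⟩, rfl⟩

theorem pvOfList_length (xs : List Char) :
    (PySem.Set.ofList xs).length = xs.dedup.length := by
  have hp : (PySem.Set.ofList xs).Perm xs.dedup := by
    rw [List.perm_ext_iff_of_nodup (PySem.Set.nodup_ofList xs) (List.nodup_dedup xs)]
    intro a
    rw [PySem.Set.mem_ofList, List.mem_dedup]
  exact hp.length_eq

theorem pvCheck_iff (item : List Char) :
    (item.length == (PySem.Set.ofList item).length) = true ↔ item.Nodup := by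
  rw [beq_iff_eq, pvOfList_length]
  constructor
  · intro h
    have hs : item.dedup.Sublist item := List.dedup_sublist item
    have := hs.eq_of_length h.symm
    rw [← List.dedup_eq_self]; exact this
  · intro h
    rw [List.dedup_eq_self.2 h]

theorem pvLen_bound (item nw : List Char) (hnd : item.Nodup) (hsub : item.Sublist nw) :
    item.length ≤ (PySem.Set.ofList nw).length := by
  rw [pvOfList_length]
  exact (hnd.subperm fun x hx => List.mem_dedup.2 (hsub.subset hx)).length_le

theorem pvCol_snoc (c : Char) (ds : List Char) (h : ds ≠ []) :
    pvCol (ds ++ [c]) = pvCol ds ++ (if ds.getLastD ' ' ≠ c then [c] else []) := by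
  induction ds using pvCol.induct with
  | case1 => exact absurd rfl h
  | case2 a =>
    by_cases hac : a = c <;> simp [pvCol, hac]
  | case3 b r ih =>
    have := ih (by simp)
    simp only [List.cons_append, pvCol] at *
    rw [this]
    simp
  | case4 a b r hab ih =>
    have := ih (by simp)
    simp only [List.cons_append, pvCol, if_neg hab] at *
    rw [this]
    simp

theorem pvTake_lastD (l : List Char) (n : Nat) (h1 : 1 ≤ n) (h : n ≤ l.length) (d : Char) :
    (l.take n).getLastD d = l.getD (n - 1) d := by
  rw [List.getLastD_eq_getLast?, List.getLast?_eq_getElem?, List.getD, List.length_take]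
  have hmin : min n l.length = n := by omega
  rw [hmin, List.getElem?_take_of_lt (by omega : n - 1 < n)]

theorem pvCollapseA_eq_pvCol (cs : List Char) (h : cs ≠ []) : pvCollapseA cs = pvCol cs := by
  obtain ⟨c0, rest, rfl⟩ : ∃ c0 rest, cs = c0 :: rest := by
    cases cs with
    | nil => exact absurd rfl h
    | cons a t => exact ⟨a, t, rfl⟩
  set cs := c0 :: rest with hcs
  set f : List Char → Int → List Char := fun nw i =>
    if PySem.List.pyGetD cs (i - 1) ' ' ≠ PySem.List.pyGetD cs i ' ' then
      nw ++ [PySem.List.pyGetD cs i ' ']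
    else nw with hf
  have key : ∀ n : Nat, 1 ≤ n → n ≤ cs.length →
      (PySem.List.pyRange 1 (n : Int)).foldl f [c0] = pvCol (cs.take n) := by
    intro n
    induction n with
    | zero => omega
    | succ n ih =>
      intro _ hlen
      by_cases hn : 1 ≤ n
      · have hrange : PySem.List.pyRange 1 ((n + 1 : Nat) : Int)
            = PySem.List.pyRange 1 (n : Int) ++ [(n : Int)] := by
          push_cast
          exact PySem.List.pyRange_one_succ_right (by exact_mod_cast hn)
        rw [hrange, List.foldl_append, ih hn (by omega)]
        have hnlt : n < cs.length := by omega
        have htake : cs.take (n + 1) = cs.take n ++ [cs[n]] := by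
          rw [List.take_add_one, List.getElem?_eq_getElem hnlt]; rfl
        have hne : cs.take n ≠ [] := by
          intro hh
          have := congrArg List.length hh
          simp [List.length_take] at this
          omega
        rw [htake, pvCol_snoc _ _ hne]
        simp only [List.foldl_cons, List.foldl_nil, hf]
        have h1 : ((n : Int) - 1) = ((n - 1 : Nat) : Int) := by omega
        rw [h1, PySem.List.pyGetD_natCast, PySem.List.pyGetD_natCast]
        rw [pvTake_lastD cs n hn (by omega)]
        have h2 : cs.getD n ' ' = cs[n] := List.getD_eq_getElem cs ' ' hnlt
        rw [h2]
        split <;> simp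
      · have : n = 0 := by omega
        subst this
        have hr : PySem.List.pyRange 1 ((1 : Nat) : Int) = [] := by decide
        rw [hr]
        simp [pvCol, hcs]
  have hlen : 1 ≤ cs.length := by simp [hcs]
  have := key cs.length hlen le_rfl
  rw [List.take_length] at this
  simpa [pvCollapseA, hcs, hf] using this

theorem pvSublist_cons_of_notMem {s : List Char} {a : Char} {l : List Char}
    (hna : a ∉ s) (h : s.Sublist (a :: l)) : s.Sublist l := by
  rcases List.sublist_cons_iff.1 h with h' | ⟨r, rfl, _⟩
  · exact h'
  · exact absurd (List.mem_cons_self) hna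

theorem pvCol_sublist_iff (w : List Char) : ∀ (s : List Char), s.Nodup →
    (s.Sublist w ↔ s.Sublist (pvCol w)) := by
  induction w using pvCol.induct with
  | case1 => intro s _; simp [pvCol]
  | case2 a => intro s _; simp [pvCol]
  | case3 b r ih =>
    intro s hnd
    rw [show pvCol (b :: b :: r) = pvCol (b :: r) by simp [pvCol]]
    rw [← ih s hnd]
    constructor
    · intro h
      rcases List.sublist_cons_iff.1 h with h' | ⟨t, rfl, ht⟩
      · exact h'
      · have hbt : b ∉ t := by simp [List.nodup_cons] at hnd; exact hnd.1
        exact List.cons_sublist_cons.2 (pvSublist_cons_of_notMem hbt ht)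
    · intro h
      exact h.trans (List.sublist_cons_self b (b :: r))
  | case4 a b r hab ih =>
    intro s hnd
    rw [show pvCol (a :: b :: r) = a :: pvCol (b :: r) by simp [pvCol, hab]]
    constructor
    · intro h
      rcases List.sublist_cons_iff.1 h with h' | ⟨t, rfl, ht⟩
      · exact List.sublist_cons_iff.2 (Or.inl ((ih s hnd).1 h'))
      · exact List.sublist_cons_iff.2 (Or.inr ⟨t, rfl, (ih t (List.nodup_cons.1 hnd).2).1 ht⟩)
    · intro h
      rcases List.sublist_cons_iff.1 h with h' | ⟨t, rfl, ht⟩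
      · exact List.sublist_cons_iff.2 (Or.inl ((ih s hnd).2 h'))
      · exact List.sublist_cons_iff.2 (Or.inr ⟨t, rfl, (ih t (List.nodup_cons.1 hnd).2).2 ht⟩)

theorem pvResultA_mem (nw : List Char) (x : String) :
    x ∈ (PySem.List.pyRange 1 ((PySem.Set.ofList nw).length + 1 : Int)).foldl
        (fun res len =>
          res ++ ((pvCombsA len.toNat nw).filter
              (fun item => item.length == (PySem.Set.ofList item).length)).map
              (fun item => String.ofList item))
        [""]
      ↔ ∃ item, item.Nodup ∧ item.Sublist nw ∧ x = String.ofList item := by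
  rw [PySem.List.foldl_append_eq_flatMap]
  simp only [List.mem_append, List.mem_singleton, List.mem_flatMap, List.mem_map,
    List.mem_filter, PySem.List.mem_pyRange_one, pvCheck_iff]
  constructor
  · rintro (rfl | ⟨len, ⟨h1, h2⟩, item, ⟨hmem, hnd⟩, rfl⟩)
    · exact ⟨[], List.nodup_nil, List.nil_sublist _, rfl⟩
    · obtain ⟨_, hsub⟩ := (pvCombsA_mem nw len.toNat item).1 hmem
      exact ⟨item, hnd, hsub, rfl⟩
  · rintro ⟨item, hnd, hsub, rfl⟩
    cases item with
    | nil => exact Or.inl rfl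
    | cons a t =>
      refine Or.inr ⟨((a :: t).length : Int), ⟨by simp, ?_⟩,
        a :: t, ⟨?_, hnd⟩, rfl⟩
      · have := pvLen_bound (a :: t) nw hnd hsub
        omega
      · exact (pvCombsA_mem nw ((a :: t).length : Int).toNat (a :: t)).2 ⟨by simp, hsub⟩

theorem pvNodup_snoc (s : List Char) (c : Char) : (s ++ [c]).Nodup ↔ s.Nodup ∧ c ∉ s := by
  simp [List.nodup_append]
  exact fun _ => ⟨fun h hc => h c hc rfl, fun h a ha he => h (he ▸ ha)⟩

theorem pvMem_foldl_add (l : List (List Char)) : ∀ (acc : PySem.Set (List Char)) (t : List Char),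
    t ∈ l.foldl PySem.Set.add acc ↔ t ∈ acc ∨ t ∈ l := by
  induction l with
  | nil => simp
  | cons x xs ih =>
    intro acc t
    simp only [List.foldl_cons, ih, PySem.Set.mem_add, List.mem_cons]
    tauto

theorem pvNodup_foldl_add (l : List (List Char)) : ∀ (acc : PySem.Set (List Char)),
    acc.Nodup → (l.foldl PySem.Set.add acc).Nodup := by
  induction l with
  | nil => simp
  | cons x xs ih => intro acc h; exact ih _ (PySem.Set.nodup_add acc x h)

theorem pvSnoc_sublist (t p : List Char) (c : Char) :
    t.Sublist (p ++ [c]) ↔ t.Sublist p ∨ ∃ s, t = s ++ [c] ∧ s.Sublist p := by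
  rw [List.sublist_append_iff]
  constructor
  · rintro ⟨l1, l2, rfl, h1, h2⟩
    rcases List.sublist_singleton.1 h2 with rfl | rfl
    · exact Or.inl (by simpa using h1)
    · exact Or.inr ⟨l1, rfl, h1⟩
  · rintro (h | ⟨s, rfl, hs⟩)
    · exact ⟨t, [], by simp, h, List.nil_sublist _⟩
    · exact ⟨s, [c], rfl, hs, List.Sublist.refl _⟩

theorem pvStepB_inv (seen : PySem.Set (List Char)) (c : Char) (p : List Char)
    (hnd : seen.Nodup) (hinv : ∀ s, s ∈ seen ↔ s.Nodup ∧ s.Sublist p) :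
    (pvStepB seen c).Nodup ∧ ∀ t, t ∈ pvStepB seen c ↔ t.Nodup ∧ t.Sublist (p ++ [c]) := by
  refine ⟨pvNodup_foldl_add _ _ hnd, fun t => ?_⟩
  rw [pvStepB, pvMem_foldl_add]
  simp only [List.mem_map, List.mem_filter, Bool.not_eq_eq_eq_not, Bool.not_true,
    List.contains_eq_mem, decide_eq_false_iff_not]
  constructor
  · rintro (ht | ⟨s, ⟨hs, hcs⟩, rfl⟩)
    · obtain ⟨hnd', hsub⟩ := (hinv t).1 ht
      exact ⟨hnd', hsub.trans (List.sublist_append_left p [c])⟩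
    · obtain ⟨hnd', hsub⟩ := (hinv s).1 hs
      exact ⟨(pvNodup_snoc s c).2 ⟨hnd', hcs⟩,
        List.Sublist.append hsub (List.Sublist.refl [c])⟩
  · rintro ⟨hnd', hsub⟩
    rcases (pvSnoc_sublist t p c).1 hsub with h | ⟨s, rfl, hs⟩
    · exact Or.inl ((hinv t).2 ⟨hnd', h⟩)
    · obtain ⟨hsnd, hcs⟩ := (pvNodup_snoc s c).1 hnd'
      exact Or.inr ⟨s, ⟨(hinv s).2 ⟨hsnd, hs⟩, hcs⟩, rfl⟩

theorem pvFoldB_inv (l : List Char) : ∀ (seen : PySem.Set (List Char)) (p : List Char),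
    seen.Nodup → (∀ s, s ∈ seen ↔ s.Nodup ∧ s.Sublist p) →
    (l.foldl pvStepB seen).Nodup ∧
      ∀ t, t ∈ l.foldl pvStepB seen ↔ t.Nodup ∧ t.Sublist (p ++ l) := by
  induction l with
  | nil => intro seen p h1 h2; simpa using ⟨h1, h2⟩
  | cons c rest ih =>
    intro seen p h1 h2
    obtain ⟨h1', h2'⟩ := pvStepB_inv seen c p h1 h2
    have := ih (pvStepB seen c) (p ++ [c]) h1' h2'
    simpa using this

theorem pvSeenB (cs : List Char) :
    (cs.foldl pvStepB (PySem.Set.ofList [[]])).Nodup ∧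
      ∀ t, t ∈ cs.foldl pvStepB (PySem.Set.ofList [[]]) ↔ t.Nodup ∧ t.Sublist cs := by
  have h0 : (PySem.Set.ofList [[]] : PySem.Set (List Char)) = [[]] := by decide
  have := pvFoldB_inv cs (PySem.Set.ofList [[]]) []
    (by rw [h0]; simp)
    (by
      intro s
      rw [h0]
      simp [List.sublist_nil]
      rintro rfl; exact List.nodup_nil)
  simpa using this

theorem pvOfList_injective : Function.Injective String.ofList := by
  intro a b h
  have := congrArg String.toList h
  simpa using this

theorem good_subsequences_spec' (word : String) :
    good_subsequences word = good_subsequences_alt word := by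
  by_cases hw : word = ""
  · subst hw; rfl
  · have hcs : word.toList ≠ [] := fun h => hw (String.toList_eq_nil_iff.1 h)
    obtain ⟨hndB, hmemB⟩ := pvSeenB word.toList
    rw [good_subsequences, if_pos hw, good_subsequences_alt]
    apply PySem.List.sorted_eq_sorted_of_perm _ _ _ (fun a b h => h)
    rw [List.perm_ext_iff_of_nodup (PySem.Set.nodup_ofList _)
      (hndB.map pvOfList_injective)]
    intro x
    rw [PySem.Set.mem_ofList, pvResultA_mem, pvCollapseA_eq_pvCol _ hcs]
    simp only [List.mem_map]
    constructor
    · rintro ⟨item, hnd, hsub, rfl⟩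
      exact ⟨item, (hmemB item).2 ⟨hnd, (pvCol_sublist_iff _ item hnd).2 hsub⟩, rfl⟩
    · rintro ⟨s, hs, rfl⟩
      obtain ⟨hnd, hsub⟩ := (hmemB s).1 hs
      exact ⟨s, hnd, (pvCol_sublist_iff _ s hnd).1 hsub, rfl⟩

-- ===== VERDICT (by name: the statement is the Claim_ definition above) =====
theorem good_subsequences_spec : Claim_equal_good_subsequences := by
  intro word _
  unfold Spec_good_subsequences
  exact good_subsequences_spec' word
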